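-- pv_equiv track=rewrite | github.com/minsu0216/codingtest | 프로그래머스/level1/크레인인형뽑기게임.py | solution
-- ===== SOURCE A (Python) =====
-- def solution(board, moves):
--     answer = 0
--
--     board = [[b[j] for b in board[::-1] if b[j] != 0] for j in range(len(board))]
--
--     bowl = []
--     for move in moves:
--         if not board[move-1]: continue
--
--         bowl.append(board[move-1].pop())
--
--         if len(bowl) >= 2:
--             if bowl[-1] == bowl[-2]:
--                 bowl.pop()
--                 bowl.pop()
--                 answer += 2
--
--     return answer
-- ===== SOURCE B (Python) =====
-- def solution(board, moves):
--     # B: work on a copy of the board itself; for each move scan the column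
--     # top-down for the first doll, zero that cell, and match against the
--     # top of the bowl before pushing.
--     grid = [row[:] for row in board]
--     answer = 0
--     bowl = []
--     for m in moves:
--         picked = None
--         for row in grid:
--             v = row[m - 1]
--             if v != 0:
--                 row[m - 1] = 0
--                 picked = v
--                 break
--         if picked is None:
--             continue
--         if bowl and bowl[-1] == picked:
--             bowl.pop()
--             answer += 2
--         else:
--             bowl.append(picked)
--     return answer
-- ===== Notes on version B (the rewrite author's own statement) =====
-- stated objective: alternative
-- what changed: B drops A's precomputed reversed column stacks and instead keeps a working copy of the board, scanning the moved column top-down each move, zeroing the picked cell, and matching the pick against the top of the bowl before pushing.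
-- outside the precondition, e.g. on solution([[1, 2, 9], [1, 2, 5]], [0, 0]): A returns 2, B returns 0
import Mathlib
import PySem

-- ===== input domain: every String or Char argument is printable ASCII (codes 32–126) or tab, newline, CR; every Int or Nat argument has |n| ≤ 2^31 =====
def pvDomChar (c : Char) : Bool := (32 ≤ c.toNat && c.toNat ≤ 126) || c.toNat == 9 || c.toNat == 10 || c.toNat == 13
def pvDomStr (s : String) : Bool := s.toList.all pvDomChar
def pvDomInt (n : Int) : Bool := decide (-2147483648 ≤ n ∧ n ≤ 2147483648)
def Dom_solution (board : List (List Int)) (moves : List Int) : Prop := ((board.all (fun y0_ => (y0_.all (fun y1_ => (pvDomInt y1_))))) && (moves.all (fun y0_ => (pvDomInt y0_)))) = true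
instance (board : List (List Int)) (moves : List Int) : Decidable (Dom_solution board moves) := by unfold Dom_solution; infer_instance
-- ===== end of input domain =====

-- B replaces A's precomputed column stacks by a per-move top-down scan of a
-- working copy of the board (alternative decomposition, same results; the
-- equivalence is about return values — A rebinds `board` locally and mutates
-- nothing the caller sees, and B copies its grid, so neither mutates its input).

-- ===== PORT A =====
-- one step of A's `for move in moves` loop over the state (answer, cols, bowl)
def solStepA (st : Int × List (List Int) × List Int) (move : Int) :
    Int × List (List Int) × List Int :=
  let answer := st.1
  let cols := st.2.1
  let bowl := st.2.2
  let col := PySem.List.pyGetD cols (move - 1) []        -- board[move-1] (A raises if out of range: Pre_)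
  if hc : col = [] then st                               -- `if not board[move-1]: continue`
  else
    let v := col.getLast hc                              -- board[move-1].pop() : value
    let cols' := PySem.List.pySetD cols (move - 1) col.dropLast   -- pop() : removal, written back
    let bowl' := bowl ++ [v]                             -- bowl.append(v)
    if 2 ≤ bowl'.length ∧
        PySem.List.pyGetD bowl' (-1) 0 = PySem.List.pyGetD bowl' (-2) 0 then
      (answer + 2, cols', bowl'.dropLast.dropLast)       -- two bowl.pop(); answer += 2
    else
      (answer, cols', bowl')

def solution (board : List (List Int)) (moves : List Int) : Int :=
  -- board = [[b[j] for b in board[::-1] if b[j] != 0] for j in range(len(board))]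
  let cols := (PySem.List.pyRange 0 board.length).map (fun j =>
    (board.reverse.filter (fun b => PySem.List.pyGetD b j 0 ≠ 0)).map
      (fun b => PySem.List.pyGetD b j 0))
  (moves.foldl solStepA (0, cols, [])).1

-- ===== PORT B =====
-- B's inner `for row in grid` scan: first row whose cell in column j is non-zero;
-- returns the picked value and the grid with that cell zeroed (none = no doll found)
def zeroFirst : List (List Int) → Int → Option (Int × List (List Int))
  | [], _ => none
  | row :: rest, j =>
    let v := PySem.List.pyGetD row j 0                   -- row[m-1] (raises if out of range: Pre_)
    if v ≠ 0 then some (v, PySem.List.pySetD row j 0 :: rest)   -- row[m-1] = 0; break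
    else
      match zeroFirst rest j with
      | none => none
      | some (w, rest') => some (w, row :: rest')

-- one step of B's `for m in moves` loop over the state (answer, grid, bowl)
def solStepB (st : Int × List (List Int) × List Int) (m : Int) :
    Int × List (List Int) × List Int :=
  let answer := st.1
  let g := st.2.1
  let bowl := st.2.2
  match zeroFirst g (m - 1) with
  | none => st                                           -- picked is None: continue
  | some (v, g') =>
    if bowl ≠ [] ∧ PySem.List.pyGetD bowl (-1) 0 = v then
      (answer + 2, g', bowl.dropLast)                    -- bowl.pop(); answer += 2
    else
      (answer, g', bowl ++ [v])                          -- bowl.append(picked)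

def solution_alt (board : List (List Int)) (moves : List Int) : Int :=
  -- grid = [row[:] for row in board] (a pure copy is the list itself)
  let grid := board.map (fun row => PySem.List.slice row none none)
  (moves.foldl solStepB (0, grid, [])).1

-- ===== PRECONDITION & SPEC =====
-- Pre_ excludes exactly the inputs where the Python A raises IndexError (a row
-- shorter than the board height, or a move outside Python's index range for
-- board[move-1]), and additionally ragged boards with extra columns combined
-- with non-positive in-range moves, where A's and B's negative-index
-- wraparound pick different accidental cells (both values are accidents).
def Pre_solution (board : List (List Int)) (moves : List Int) : Prop :=
  (∀ row ∈ board, board.length ≤ row.length) ∧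
  (∀ m ∈ moves, (1 ≤ m ∧ m ≤ (board.length : Int)) ∨
    ((∀ row ∈ board, row.length = board.length) ∧
      1 - (board.length : Int) ≤ m ∧ m ≤ 0))
instance (board : List (List Int)) (moves : List Int) : Decidable (Pre_solution board moves) := by
  unfold Pre_solution; infer_instance

def pvWitness_solution : List (List Int) × List Int := ([[0, 1], [1, 1]], [2, 2, 1])

def Spec_solution (board : List (List Int)) (moves : List Int) (out : Int) : Prop := out = solution_alt board moves
instance (board : List (List Int)) (moves : List Int) (out : Int) : Decidable (Spec_solution board moves out) := by unfold Spec_solution; infer_instance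

-- ===== CLAIM (what is proved, stated in full; the proofs are below) =====
def Claim_equal_solution : Prop := ∀ (board : List (List Int)) (moves : List Int), Dom_solution board moves → Pre_solution board moves → Spec_solution board moves (solution board moves)

-- ===== LEMMAS AND PROOFS =====

-- the non-zero entries of column k of grid g, top row first
def colN (g : List (List Int)) (k : Nat) : List Int :=
  (g.map (fun row => row.getD k 0)).filter (fun v => v ≠ 0)

-- Nat-index version of zeroFirst (what zeroFirst computes once indices normalise)
def zeroFirstN : List (List Int) → Nat → Option (Int × List (List Int))
  | [], _ => none
  | row :: rest, k =>
    let v := row.getD k 0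
    if v ≠ 0 then some (v, row.set k 0 :: rest)
    else
      match zeroFirstN rest k with
      | none => none
      | some (w, rest') => some (w, row :: rest')

-- the simulation invariant between A's column stacks and B's grid
def SimInv (n : Nat) (lens : List Nat) (cols g : List (List Int)) : Prop :=
  cols.length = n ∧ g.map List.length = lens ∧
  ∀ k : Nat, k < n → cols.getD k [] = (colN g k).reverse

theorem Inv_init (board : List (List Int)) :
    SimInv board.length (board.map List.length)
      ((PySem.List.pyRange 0 board.length).map (fun j =>
        (board.reverse.filter (fun b => PySem.List.pyGetD b j 0 ≠ 0)).map
          (fun b => PySem.List.pyGetD b j 0))) board := by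
  refine ⟨by simp [PySem.List.pyRange_zero_natCast], rfl, ?_⟩
  intro k hk
  rw [PySem.List.pyRange_zero_natCast, List.map_map]
  rw [List.getD_eq_getElem _ _ (by simpa using hk)]
  simp only [List.getElem_map, List.getElem_range, Function.comp]
  simp only [PySem.List.pyGetD_natCast, colN]
  rw [List.filter_map]
  simp [List.filter_reverse, List.map_reverse, Function.comp_def]

-- normalisation of an in-range negative Python index over lists of length n
theorem idx_norm {n : Nat} {j : Int} (h : PySem.Raise.InRange n j) :
    ∃ k : Nat, k < n ∧
      (∀ {α : Type} (xs : List α) (d : α), xs.length = n → PySem.List.pyGetD xs j d = xs.getD k d) ∧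
      (∀ {α : Type} (xs : List α) (v : α), xs.length = n → PySem.List.pySetD xs j v = xs.set k v) := by
  obtain ⟨h1, h2⟩ := h
  have hks : ∃ k : Nat, PySem.List.pyIdx? n j = some k ∧ k < n := by
    simp only [PySem.List.pyIdx?]
    split_ifs
    all_goals first
      | exact ⟨j.toNat, rfl, by omega⟩
      | exact ⟨n - (-j).toNat, rfl, by omega⟩
  obtain ⟨k, hk, hkn⟩ := hks
  refine ⟨k, hkn, ?_, ?_⟩
  · intro α xs d hlen
    simp [PySem.List.pyGetD, PySem.List.pyGet?, hlen, hk, List.getD]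
  · intro α xs v hlen
    simp [PySem.List.pySetD, PySem.List.pySet?, hlen, hk]

-- a non-negative index below n reads/writes the same cell in any list of length ≥ n
theorem idx_norm_pos {n : Nat} {j : Int} (h0 : 0 ≤ j) (h1 : j < n) :
    ∃ k : Nat, k < n ∧
      (∀ {α : Type} (xs : List α) (d : α), n ≤ xs.length → PySem.List.pyGetD xs j d = xs.getD k d) ∧
      (∀ {α : Type} (xs : List α) (v : α), PySem.List.pySetD xs j v = xs.set k v) := by
  refine ⟨j.toNat, by omega, ?_, ?_⟩
  · intro α xs d hlen
    rw [PySem.List.pyGetD_eq_getElem xs d h0 (by omega),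
        List.getD_eq_getElem xs d (by omega)]
  · intro α xs v
    exact PySem.List.pySetD_of_nonneg xs v h0

theorem zeroFirst_eq_N {g : List (List Int)} {j : Int} {k : Nat}
    (hrow : ∀ row ∈ g, PySem.List.pyGetD row j 0 = row.getD k 0 ∧
      PySem.List.pySetD row j 0 = row.set k 0) :
    zeroFirst g j = zeroFirstN g k := by
  induction g with
  | nil => rfl
  | cons row rest ih =>
    obtain ⟨hg, hs⟩ := hrow row (List.mem_cons_self ..)
    simp only [zeroFirst, zeroFirstN, hg, hs,
      ih (fun r hr => hrow r (List.mem_cons_of_mem _ hr))]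

theorem zeroFirstN_none {g : List (List Int)} {k : Nat} (h : colN g k = []) :
    zeroFirstN g k = none := by
  induction g with
  | nil => rfl
  | cons row rest ih =>
    simp only [colN, List.map_cons, List.filter_cons, List.getD_eq_getElem?_getD] at h
    by_cases hz : row[k]?.getD 0 = 0
    · simp only [hz] at h
      simp only [zeroFirstN, List.getD_eq_getElem?_getD, hz]
      simp [ih (by simpa [colN, List.getD_eq_getElem?_getD] using h)]
    · simp [hz] at h

theorem zeroFirstN_some {g : List (List Int)} {k : Nat} {v : Int} {rest : List Int}
    (hrows : ∀ row ∈ g, k < row.length) (h : colN g k = v :: rest) :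
    ∃ g', zeroFirstN g k = some (v, g') ∧ colN g' k = rest ∧
      (∀ k', k' ≠ k → colN g' k' = colN g k') ∧ g'.map List.length = g.map List.length := by
  induction g generalizing v rest with
  | nil => simp [colN] at h
  | cons row g ih =>
    have hrow := hrows row (List.mem_cons_self ..)
    have hgrows : ∀ r ∈ g, k < r.length := fun r hr => hrows r (List.mem_cons_of_mem _ hr)
    by_cases hz : row[k]?.getD 0 = 0
    · -- the head row has no doll in column k: recurse
      have hcol : colN (row :: g) k = colN g k := by simp [colN, hz]
      rw [hcol] at h
      obtain ⟨g', hzf, hck, hck', hlen'⟩ := ih hgrows h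
      refine ⟨row :: g', ?_, ?_, ?_, ?_⟩
      · simp only [zeroFirstN, List.getD_eq_getElem?_getD, hz]
        simp [hzf]
      · simpa [colN, hz] using hck
      · intro k' hk'
        simp only [colN, List.map_cons, List.filter_cons]
        have := hck' k' hk'
        simp only [colN] at this
        rw [this]
      · simp [hlen']
    · -- the head row holds the first doll of column k
      have hcol : colN (row :: g) k = row[k]?.getD 0 :: colN g k := by
        simp [colN, hz]
      rw [hcol] at h
      obtain ⟨hv, hrest⟩ := List.cons.inj h
      refine ⟨row.set k 0 :: g, ?_, ?_, ?_, ?_⟩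
      · have hvz : v ≠ 0 := hv ▸ hz
        simp only [zeroFirstN, List.getD_eq_getElem?_getD]
        simp [hv, hvz]
      · have hset0 : (row.set k 0)[k]?.getD 0 = (0 : Int) := by
          rw [List.getElem?_eq_getElem (by simpa using hrow)]
          simp
        simp [colN, hset0, ← hrest]
      · intro k' hk'
        have hne : (row.set k 0)[k']?.getD 0 = row[k']?.getD 0 := by
          by_cases hlt : k' < row.length
          · rw [List.getElem?_eq_getElem (by simpa using hlt),
                List.getElem?_eq_getElem hlt]
            simp [List.getElem_set_ne (Ne.symm hk')]
          · rw [List.getElem?_eq_none (by simpa using Nat.le_of_not_lt hlt),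
                List.getElem?_eq_none (Nat.le_of_not_lt hlt)]
        simp [colN, List.filter_cons, hne]
      · simp

theorem step_sim {n : Nat} {lens : List Nat} {ans : Int} {bowl : List Int}
    {cols g : List (List Int)} (hI : SimInv n lens cols g)
    (hge : ∀ L ∈ lens, n ≤ L) (m : Int)
    (hm : (1 ≤ m ∧ m ≤ (n : Int)) ∨
      ((∀ L ∈ lens, L = n) ∧ 1 - (n : Int) ≤ m ∧ m ≤ 0)) :
    (solStepA (ans, cols, bowl) m).1 = (solStepB (ans, g, bowl) m).1 ∧
    (solStepA (ans, cols, bowl) m).2.2 = (solStepB (ans, g, bowl) m).2.2 ∧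
    SimInv n lens (solStepA (ans, cols, bowl) m).2.1 (solStepB (ans, g, bowl) m).2.1 := by
  obtain ⟨hclen, hlens, hcol⟩ := hI
  have hrowlen : ∀ row ∈ g, n ≤ row.length := by
    intro row hr
    exact hge _ (hlens ▸ List.mem_map_of_mem (f := List.length) hr)
  -- normalise the Python index m-1 to one natural column index k for cols and rows
  obtain ⟨k, hkn, hgetC, hsetC, hgetR, hsetR⟩ :
      ∃ k : Nat, k < n ∧
        (∀ d, PySem.List.pyGetD cols (m - 1) d = cols.getD k d) ∧
        (∀ x, PySem.List.pySetD cols (m - 1) x = cols.set k x) ∧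
        (∀ row ∈ g, ∀ (d : Int), PySem.List.pyGetD row (m - 1) d = row.getD k d) ∧
        (∀ row ∈ g, ∀ (v : Int), PySem.List.pySetD row (m - 1) v = row.set k v) := by
    rcases hm with ⟨h1, h2⟩ | ⟨hsq, h1, h2⟩
    · obtain ⟨k, hk, hget, hset⟩ := idx_norm_pos (n := n) (j := m - 1) (by omega) (by omega)
      exact ⟨k, hk, fun d => hget cols d (le_of_eq hclen.symm),
        fun x => hset cols x,
        fun row hr d => hget row d (hrowlen row hr),
        fun row hr v => hset row v⟩
    · have hsqg : ∀ row ∈ g, row.length = n := by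
        intro row hr
        exact hsq _ (hlens ▸ List.mem_map_of_mem (f := List.length) hr)
      obtain ⟨k, hk, hget, hset⟩ := idx_norm (n := n) (j := m - 1) ⟨by omega, by omega⟩
      exact ⟨k, hk, fun d => hget cols d hclen, fun x => hset cols x hclen,
        fun row hr d => hget row d (hsqg row hr),
        fun row hr v => hset row v (hsqg row hr)⟩
  have hzf : zeroFirst g (m - 1) = zeroFirstN g k :=
    zeroFirst_eq_N (fun row hr => ⟨hgetR row hr 0, hsetR row hr 0⟩)
  have hcols : PySem.List.pyGetD cols (m - 1) [] = (colN g k).reverse := by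
    rw [hgetC [], hcol k hkn]
  cases hc : colN g k with
  | nil =>
    have hA : PySem.List.pyGetD cols (m - 1) [] = [] := by rw [hcols, hc, List.reverse_nil]
    have hB : zeroFirst g (m - 1) = none := by rw [hzf]; exact zeroFirstN_none hc
    simp only [solStepA, solStepB, hA, hB, dif_pos]
    exact ⟨trivial, trivial, hclen, hlens, hcol⟩
  | cons v rest =>
    obtain ⟨g', hzfN, hck, hck', hlen'⟩ :=
      zeroFirstN_some (fun row hr => lt_of_lt_of_le hkn (hrowlen row hr)) hc
    have hB : zeroFirst g (m - 1) = some (v, g') := by rw [hzf, hzfN]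
    have hA : PySem.List.pyGetD cols (m - 1) [] = rest.reverse ++ [v] := by
      rw [hcols, hc, List.reverse_cons]
    have hAne : rest.reverse ++ [v] ≠ [] := by simp
    have hlast : (rest.reverse ++ [v]).getLast hAne = v := List.getLast_concat
    have hdrop : (rest.reverse ++ [v]).dropLast = rest.reverse := List.dropLast_concat ..
    have hsetc : PySem.List.pySetD cols (m - 1) (rest.reverse ++ [v]).dropLast
        = cols.set k rest.reverse := by rw [hdrop, hsetC]
    have hInv' : SimInv n lens (cols.set k rest.reverse) g' := by
      refine ⟨by simp [hclen], by rw [hlen', hlens], ?_⟩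
      intro k' hk'
      by_cases hkk : k' = k
      · subst hkk
        rw [List.getD_eq_getElem (cols.set k' rest.reverse) [] (by simp [hclen]; omega)]
        rw [List.getElem_set_self (by simp [hclen]; omega), hck]
      · have h1 : (cols.set k rest.reverse).getD k' [] = cols.getD k' [] := by
          rw [List.getD_eq_getElem (cols.set k rest.reverse) [] (by simp [hclen]; omega),
              List.getD_eq_getElem cols [] (show k' < cols.length by omega),
              List.getElem_set_ne (Ne.symm hkk)]
        rw [h1, hcol k' hk', hck' k' hkk]
    -- now compare the bowl logic of the two steps
    simp only [solStepA, solStepB, hA, hB, hsetc, dif_neg hAne, hlast]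
    by_cases hbe : bowl = []
    · subst hbe
      refine ⟨by simp, by simp, by simpa using hInv'⟩
    · have hb2 : 2 ≤ (bowl ++ [v]).length := by
        rcases bowl with _ | ⟨x, xs⟩
        · exact absurd rfl hbe
        · simp
      have hm1 : PySem.List.pyGetD (bowl ++ [v]) (-1) 0 = v :=
        PySem.List.pyGetD_neg_one_append_singleton bowl v 0
      have hlt : bowl.length - 1 < bowl.length := by
        rcases bowl with _ | ⟨x, xs⟩
        · exact absurd rfl hbe
        · simp
      have hm2 : PySem.List.pyGetD (bowl ++ [v]) (-2) 0 = bowl.getLast hbe := by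
        rw [show PySem.List.pyGetD (bowl ++ [v]) (-2) 0
              = (PySem.List.pyGet? (bowl ++ [v]) (-2)).getD 0 from rfl,
            PySem.List.pyGet?_neg_ofNat _ 2 (by omega) (by simpa using hb2),
            show (bowl ++ [v]).length - 2 = bowl.length - 1 by simp,
            List.getElem?_append_left hlt, List.getElem?_eq_getElem hlt,
            List.getElem_length_sub_one_eq_getLast hlt]
        rfl
      have hmB : PySem.List.pyGetD bowl (-1) 0 = bowl.getLast hbe :=
        PySem.List.pyGetD_neg_one bowl 0 hbe
      simp only [hm1, hm2, hb2, hmB, true_and, hbe, ne_eq, not_false_iff]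
      by_cases heq : bowl.getLast hbe = v
      · simp only [heq, List.dropLast_concat]
        exact ⟨by simp, by simp, hInv'⟩
      · rw [if_neg (by exact fun hvv => heq hvv.symm), if_neg heq]
        exact ⟨rfl, rfl, hInv'⟩

theorem loop_sim {n : Nat} {lens : List Nat} (moves : List Int)
    (hge : ∀ L ∈ lens, n ≤ L)
    (hmv : ∀ m ∈ moves, (1 ≤ m ∧ m ≤ (n : Int)) ∨
      ((∀ L ∈ lens, L = n) ∧ 1 - (n : Int) ≤ m ∧ m ≤ 0)) :
    ∀ (ans : Int) (bowl : List Int) (cols g : List (List Int)), SimInv n lens cols g →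
    (moves.foldl solStepA (ans, cols, bowl)).1 = (moves.foldl solStepB (ans, g, bowl)).1 := by
  induction moves with
  | nil => intro ans bowl cols g _; rfl
  | cons m ms ih =>
    intro ans bowl cols g hI
    obtain ⟨h1, h2, h3⟩ := step_sim hI hge m (hmv m (List.mem_cons_self ..))
    simp only [List.foldl_cons]
    have hres := (ih (fun m hm => hmv m (List.mem_cons_of_mem _ hm)))
      (solStepA (ans, cols, bowl) m).1 (solStepA (ans, cols, bowl) m).2.2
      (solStepA (ans, cols, bowl) m).2.1 (solStepB (ans, g, bowl) m).2.1 h3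
    calc (List.foldl solStepA (solStepA (ans, cols, bowl) m) ms).1
        = (List.foldl solStepB ((solStepA (ans, cols, bowl) m).1,
            (solStepB (ans, g, bowl) m).2.1, (solStepA (ans, cols, bowl) m).2.2) ms).1 := hres
      _ = (List.foldl solStepB (solStepB (ans, g, bowl) m) ms).1 := by rw [h1, h2]

-- ===== VERDICT (by name: the statement is the Claim_ definition above) =====
theorem solution_spec : Claim_equal_solution := by
  intro board moves _ hpre
  unfold Spec_solution solution solution_alt
  have hgrid : board.map (fun row => PySem.List.slice row none none) = board := by
    simp [PySem.List.slice_none_none]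
  rw [hgrid]
  refine loop_sim moves ?_ ?_ 0 [] _ board (Inv_init board)
  · intro L hL
    obtain ⟨row, hrow, hrl⟩ := List.mem_map.mp hL
    exact hrl ▸ hpre.1 row hrow
  · intro m hm
    rcases hpre.2 m hm with h | ⟨hsq, h1, h2⟩
    · exact Or.inl h
    · refine Or.inr ⟨?_, h1, h2⟩
      intro L hL
      obtain ⟨row, hrow, hrl⟩ := List.mem_map.mp hL
      exact hrl ▸ hsq row hrow
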